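-- pv_equiv track=rewrite | github.com/lsh9672/algorithm_study | 2022_01_16/더_맵게_힙구현.py | solution
-- ===== SOURCE A (Python) =====
-- import heapq
--
-- def solution(scoville, K):
--     answer = 0
--
--     scoville = sorted(scoville)
--
--     heapq.heapify(scoville)
--
--     if scoville[0]>= K:
--         return 0
--
--     #스코빌 지수가 K 미만일 경우
--     while True:
--
--         if len(scoville) <= 1:
--             answer = -1
--             break
--
--         #가장 작은 값 출력
--         first_scoville = heapq.heappop(scoville)
--
--         #그다음으로 작은 값 출력
--         second_scoville = heapq.heappop(scoville)
--         temp = first_scoville+(second_scoville*2)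
--
--         heapq.heappush(scoville,temp)
--
--         answer += 1
--
--         if scoville[0]>= K:
--             break
--
--     return answer
-- ===== SOURCE B (Python) =====
-- def solution(scoville, K):
--     # unordered bag + selection-style arg-min scans; no heap, no sorting
--     bag = list(scoville)
--     if min(bag) >= K:
--         return 0
--     answer = 0
--     while len(bag) > 1:
--         k = 0
--         for i in range(1, len(bag)):
--             if bag[i] < bag[k]:
--                 k = i
--         first = bag.pop(k)
--         k = 0
--         for i in range(1, len(bag)):
--             if bag[i] < bag[k]:
--                 k = i
--         second = bag.pop(k)
--         bag.append(first + 2 * second)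
--         answer += 1
--         if min(bag) >= K:
--             return answer
--     return -1
-- ===== Notes on version B (the rewrite author's own statement) =====
-- stated objective: alternative
-- what changed: B drops both the heap and the initial sort: it keeps the collection as an unordered bag, extracts each of the two smallest elements by a selection-style linear arg-min scan and pop, appends the combined value at the end, and re-checks the threshold with min(); no ordering invariant is ever maintained.
import Mathlib
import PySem

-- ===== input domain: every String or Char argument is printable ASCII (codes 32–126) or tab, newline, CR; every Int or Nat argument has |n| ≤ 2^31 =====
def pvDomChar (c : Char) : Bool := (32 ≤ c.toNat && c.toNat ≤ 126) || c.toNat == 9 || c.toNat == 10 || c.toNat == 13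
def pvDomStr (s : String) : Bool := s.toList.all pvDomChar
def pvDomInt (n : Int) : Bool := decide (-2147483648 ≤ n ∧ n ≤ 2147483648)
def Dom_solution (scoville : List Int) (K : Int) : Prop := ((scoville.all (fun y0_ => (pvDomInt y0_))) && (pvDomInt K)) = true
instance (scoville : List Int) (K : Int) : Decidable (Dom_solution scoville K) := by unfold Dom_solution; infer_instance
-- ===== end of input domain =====

-- B replaces A's sort + binary heap by an unordered bag processed with selection-style
-- linear arg-min scans (no sort, no heap, no ordering invariant); same return value.

-- ===== PORT A =====
-- A uses the heapq library; its operations (CPython's _siftdown/_siftup/heapify/heappush/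
-- heappop) are ported literally below.  List reads heap[i] are at indices that are in range
-- whenever the Python code runs them, so they are ported as `getD _ 0`.

-- CPython _siftdown's while loop (bubble the new item up towards startpos)
def siftdownLoop (heap : List Int) (startpos pos : Nat) (newitem : Int) : List Int :=
  if _h : startpos < pos then
    let parentpos := (pos - 1) / 2
    let parent := heap.getD parentpos 0
    if newitem < parent then
      siftdownLoop (heap.set pos parent) startpos parentpos newitem
    else heap.set pos newitem
  else heap.set pos newitem
  termination_by pos
  decreasing_by omega

-- CPython _siftdown(heap, startpos, pos)
def pySiftdown (heap : List Int) (startpos pos : Nat) : List Int :=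
  siftdownLoop heap startpos pos (heap.getD pos 0)

-- CPython _siftup's while loop (move the hole down to a leaf along the smaller children);
-- returns the heap together with the final hole position
def siftupLoop (heap : List Int) (pos endpos : Nat) : List Int × Nat :=
  let childpos := 2 * pos + 1
  if _h : childpos < endpos then
    let rightpos := childpos + 1
    let childpos :=
      if rightpos < endpos ∧ ¬ heap.getD childpos 0 < heap.getD rightpos 0 then rightpos
      else childpos
    siftupLoop (heap.set pos (heap.getD childpos 0)) childpos endpos
  else (heap, pos)
  termination_by endpos - pos
  decreasing_by
    split_ifs with hc
    · omega
    · omega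

-- CPython _siftup(heap, pos)
def pySiftup (heap : List Int) (pos : Nat) : List Int :=
  let newitem := heap.getD pos 0
  let r := siftupLoop heap pos heap.length
  pySiftdown (r.1.set r.2 newitem) pos r.2

-- CPython heapify(x): for i in reversed(range(n//2)): _siftup(x, i)
def pyHeapify (x : List Int) : List Int :=
  ((List.range (x.length / 2)).reverse).foldl (fun h i => pySiftup h i) x

-- CPython heappush(heap, item): heap.append(item); _siftdown(heap, 0, len(heap)-1)
def pyHeappush (heap : List Int) (item : Int) : List Int :=
  let h2 := heap ++ [item]
  pySiftdown h2 0 (h2.length - 1)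

-- CPython heappop(heap): lastelt = heap.pop(); if heap: …
def pyHeappop (heap : List Int) : Int × List Int :=
  let lastelt := heap.getLastD 0
  let rest := heap.dropLast
  if rest ≠ [] then
    (rest.getD 0 0, pySiftup (rest.set 0 lastelt) 0)
  else (lastelt, rest)

-- A's while-True loop; the Nat argument is a totality guard only (it starts at the heap
-- size and each iteration shrinks the heap by one, so it never runs out)
def solutionLoop : Nat → List Int → Int → Int → Int
  | 0, _, _, _ => -1
  | fuel + 1, heap, K, answer =>
    if heap.length ≤ 1 then -1
    else
      let p1 := pyHeappop heap
      let p2 := pyHeappop p1.2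
      let temp := p1.1 + p2.1 * 2
      let h3 := pyHeappush p2.2 temp
      let answer := answer + 1
      if h3.getD 0 0 ≥ K then answer else solutionLoop fuel h3 K answer

def solution (scoville : List Int) (K : Int) : Int :=
  let s := PySem.List.sorted scoville (fun x => x) false
  let h := pyHeapify s
  if h.getD 0 0 ≥ K then 0 else solutionLoop h.length h K 0

-- ===== PORT B =====
-- Source B's arg-min scan: k = 0; for i in range(1, len(bag)): if bag[i] < bag[k]: k = i
def argmin (bag : List Int) : Int :=
  (PySem.List.pyRange 1 (PySem.List.len bag) 1).foldl
    (fun k i => if PySem.List.pyGetD bag i 0 < PySem.List.pyGetD bag k 0 then i else k) 0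

-- Source B's while loop; the Nat argument is a totality guard only (it starts at the bag
-- size and each iteration shrinks the bag by one, so it never runs out)
def bagLoop : Nat → List Int → Int → Int → Int
  | 0, _, _, _ => -1
  | fuel + 1, bag, K, answer =>
    if 1 < bag.length then
      match PySem.List.pop? bag (argmin bag) with
      | none => -1  -- unreachable: argmin is in range on a nonempty list
      | some (first, bag1) =>
        match PySem.List.pop? bag1 (argmin bag1) with
        | none => -1  -- unreachable
        | some (second, bag2) =>
          let bag3 := bag2 ++ [first + 2 * second]
          let answer := answer + 1
          if (PySem.List.min? bag3 (fun x => x)).getD 0 ≥ K then answer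
          else bagLoop fuel bag3 K answer
    else -1

def solution_alt (scoville : List Int) (K : Int) : Int :=
  let bag := scoville
  if (PySem.List.min? bag (fun x => x)).getD 0 ≥ K then 0
  else bagLoop bag.length bag K 0

-- ===== PRECONDITION & SPEC =====
-- A evaluates scoville[0] (after sorting), which raises IndexError on the empty list;
-- Pre_ excludes exactly the empty list (B's min(bag) raises there too).
def Pre_solution (scoville : List Int) (K : Int) : Prop := scoville ≠ []
instance (scoville : List Int) (K : Int) : Decidable (Pre_solution scoville K) := by
  unfold Pre_solution; infer_instance

def pvWitness_solution : List Int × Int := ([1, 2, 3, 9, 10, 12], 7)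

def Spec_solution (scoville : List Int) (K : Int) (out : Int) : Prop := out = solution_alt scoville K
instance (scoville : List Int) (K : Int) (out : Int) : Decidable (Spec_solution scoville K out) := by
  unfold Spec_solution; infer_instance

-- ===== CLAIM (what is proved, stated in full; the proofs are below) =====
def Claim_equal_solution : Prop := ∀ (scoville : List Int) (K : Int), Dom_solution scoville K → Pre_solution scoville K → Spec_solution scoville K (solution scoville K)

-- ===== LEMMAS AND PROOFS =====

-- ---- proof-side ghost: the greedy on an explicitly sorted list (used only to relate
-- ---- the two ports; defined here, below the claim block, because only proofs use it)

-- bisect_left on the sorted ghost list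
def bisLoop (rest : List Int) (t : Int) (lo hi : Nat) : Nat :=
  if _h : lo < hi then
    let mid := (lo + hi) / 2
    if rest.getD mid 0 < t then bisLoop rest t (mid + 1) hi else bisLoop rest t lo mid
  else lo
  termination_by hi - lo
  decreasing_by
    · omega
    · omega

-- the ghost loop: pop the two front elements of the sorted list, re-insert the combination
def ghostLoop : Nat → List Int → Int → Int → Int
  | 0, _, _, _ => -1
  | fuel + 1, lst, K, answer =>
    if 1 < lst.length then
      let temp := lst.getD 0 0 + 2 * lst.getD 1 0
      let rest := PySem.List.slice lst (some 2) none
      let lo := bisLoop rest temp 0 rest.length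
      let lst2 := PySem.List.insert rest (lo : Int) temp
      let answer := answer + 1
      if lst2.getD 0 0 ≥ K then answer else ghostLoop fuel lst2 K answer
    else -1

theorem length_siftdownLoop (heap : List Int) (s pos : Nat) (x : Int) :
    (siftdownLoop heap s pos x).length = heap.length := by
  fun_induction siftdownLoop heap s pos x <;> simp_all

theorem length_siftupLoop (heap : List Int) (pos endpos : Nat) :
    (siftupLoop heap pos endpos).1.length = heap.length := by
  fun_induction siftupLoop heap pos endpos <;> simp_all

theorem length_pySiftup (heap : List Int) (pos : Nat) :
    (pySiftup heap pos).length = heap.length := by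
  unfold pySiftup pySiftdown
  rw [length_siftdownLoop]
  simp [length_siftupLoop]

theorem length_pyHeappush (heap : List Int) (x : Int) :
    (pyHeappush heap x).length = heap.length + 1 := by
  unfold pyHeappush pySiftdown
  rw [length_siftdownLoop]
  simp

theorem length_pyHeappop (heap : List Int) :
    (pyHeappop heap).2.length = heap.length - 1 := by
  unfold pyHeappop
  by_cases h : heap.dropLast = [] <;> simp [h, length_pySiftup]
  have h0 : heap.dropLast.length = 0 := by rw [h]; rfl
  have := heap.length_dropLast
  omega


-- parent-chain iterate (index j's parent in the binary-heap array is (j-1)/2)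
def parentN : Nat → Nat → Nat
  | 0, p => p
  | k+1, p => parentN k ((p - 1) / 2)

theorem parentN_le (k p : Nat) : parentN k p ≤ p := by
  induction k generalizing p with
  | zero => simp [parentN]
  | succ k ih => exact le_trans (ih _) (by omega)

theorem parentN_zero (p : Nat) : ∃ k, parentN k p = 0 := by
  induction p using Nat.strong_induction_on with
  | _ p ih =>
    cases p with
    | zero => exact ⟨0, rfl⟩
    | succ q =>
      obtain ⟨k, hk⟩ := ih ((q + 1 - 1) / 2) (by omega)
      exact ⟨k + 1, hk⟩

-- the CPython invariant: every non-root entry is ≥ its parent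
def IsHeap (l : List Int) : Prop :=
  ∀ j : Nat, 0 < j → j < l.length → l.getD ((j - 1) / 2) 0 ≤ l.getD j 0

theorem getD_set_self (l : List Int) (i : Nat) (a : Int) (h : i < l.length) :
    (l.set i a).getD i 0 = a := by
  simp [List.getD_eq_getElem?_getD, h]

theorem getD_set_ne (l : List Int) (i j : Nat) (a : Int) (h : i ≠ j) :
    (l.set i a).getD j 0 = l.getD j 0 := by
  simp [List.getD_eq_getElem?_getD, List.getElem?_set_ne h]

theorem getD_append_left (l : List Int) (x : Int) (i : Nat) (h : i < l.length) :
    (l ++ [x]).getD i 0 = l.getD i 0 := by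
  simp [List.getD_eq_getElem?_getD, List.getElem?_append_left h]

theorem getD_append_right (l : List Int) (x : Int) :
    (l ++ [x]).getD l.length 0 = x := by
  simp [List.getD_eq_getElem?_getD]

theorem getD_dropLast (l : List Int) (i : Nat) (h : i < l.length - 1) :
    l.dropLast.getD i 0 = l.getD i 0 := by
  have h1 : i < l.dropLast.length := by simp; omega
  have h2 : i < l.length := by omega
  rw [List.getD_eq_getElem?_getD, List.getD_eq_getElem?_getD,
    List.getElem?_eq_getElem h1, List.getElem?_eq_getElem h2]
  simp [List.getElem_dropLast]

theorem getD_eq_getElem (l : List Int) (i : Nat) (h : i < l.length) :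
    l.getD i 0 = l[i] := by
  simp [List.getD_eq_getElem?_getD, h]

theorem coe_set (l : List Int) (i : Nat) (a : Int) (h : i < l.length) :
    ((l.set i a : List Int) : Multiset Int) + {l.getD i 0} = (l : Multiset Int) + {a} := by
  have h1 : l.set i a = l.take i ++ a :: l.drop (i + 1) :=
    List.set_eq_take_cons_drop a (by omega)
  have h2 : l.take i ++ l[i] :: l.drop (i + 1) = l := by
    rw [List.getElem_cons_drop, List.take_append_drop]
  rw [getD_eq_getElem l i h, h1]
  conv_rhs => rw [← h2]
  simp only [← Multiset.coe_add, ← Multiset.cons_coe]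
  simp only [← Multiset.singleton_add]
  abel

-- the perm step both sift loops take: move the value at j into the hole at i,
-- the hole moving to j; filling the hole with x afterwards
theorem coe_set_set (l : List Int) (i j : Nat) (x : Int)
    (hij : i ≠ j) (hi : i < l.length) (hj : j < l.length) :
    (((l.set i (l.getD j 0)).set j x : List Int) : Multiset Int)
      = ((l.set i x : List Int) : Multiset Int) := by
  have hm : (l.set i (l.getD j 0)).getD j 0 = l.getD j 0 := getD_set_ne l i j _ hij
  have hjl : j < (l.set i (l.getD j 0)).length := by simpa using hj
  have e1 := coe_set (l.set i (l.getD j 0)) j x hjl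
  rw [hm] at e1
  have e2 := coe_set l i (l.getD j 0) hi
  have e3 := coe_set l i x hi
  have key : (((l.set i (l.getD j 0)).set j x : List Int) : Multiset Int) + ({l.getD j 0} + {l.getD i 0})
      = ((l.set i x : List Int) : Multiset Int) + ({l.getD j 0} + {l.getD i 0}) := by
    calc (((l.set i (l.getD j 0)).set j x : List Int) : Multiset Int) + ({l.getD j 0} + {l.getD i 0})
        = ((((l.set i (l.getD j 0)).set j x : List Int) : Multiset Int) + {l.getD j 0}) + {l.getD i 0} := by abel
      _ = (((l.set i (l.getD j 0) : List Int) : Multiset Int) + {x}) + {l.getD i 0} := by rw [e1]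
      _ = (((l.set i (l.getD j 0) : List Int) : Multiset Int) + {l.getD i 0}) + {x} := by abel
      _ = ((l : Multiset Int) + {l.getD j 0}) + {x} := by rw [e2]
      _ = ((l : Multiset Int) + {x}) + {l.getD j 0} := by abel
      _ = (((l.set i x : List Int) : Multiset Int) + {l.getD i 0}) + {l.getD j 0} := by rw [e3]
      _ = _ := by abel
  exact add_right_cancel key

theorem heap_root_le (l : List Int) (hh : IsHeap l) :
    ∀ j : Nat, j < l.length → l.getD 0 0 ≤ l.getD j 0 := by
  intro j
  induction j using Nat.strong_induction_on with
  | _ j ih =>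
    intro hj
    rcases Nat.eq_zero_or_pos j with h0 | h0
    · subst h0; exact le_refl _
    · exact le_trans (ih ((j - 1) / 2) (by omega) (by omega)) (hh j h0 hj)

theorem heap_root_le_mem (l : List Int) (hh : IsHeap l) (x : Int) (hx : x ∈ l) :
    l.getD 0 0 ≤ x := by
  obtain ⟨j, hj, rfl⟩ := List.mem_iff_getElem.mp hx
  rw [← getD_eq_getElem l j hj]
  exact heap_root_le l hh j hj

-- filling the hole at pos with a fitting value restores the full heap invariant
theorem setIsHeap (heap : List Int) (pos : Nat) (newitem : Int)
    (hlen : pos < heap.length)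
    (hi : ∀ j : Nat, 0 < j → j < heap.length → j ≠ pos → (j - 1) / 2 ≠ pos →
        heap.getD ((j - 1) / 2) 0 ≤ heap.getD j 0)
    (hii1 : ∀ c : Nat, c < heap.length → 0 < c → (c - 1) / 2 = pos → newitem ≤ heap.getD c 0)
    (hpar : 0 < pos → heap.getD ((pos - 1) / 2) 0 ≤ newitem) :
    IsHeap (heap.set pos newitem) := by
  intro j hj0 hjl
  rw [List.length_set] at hjl
  by_cases hjpos : j = pos
  · subst hjpos
    rw [getD_set_self _ _ _ hlen, getD_set_ne _ _ _ _ (show j ≠ (j - 1) / 2 by omega)]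
    exact hpar hj0
  · rw [getD_set_ne _ _ _ _ (show pos ≠ j by omega)]
    by_cases hjc : (j - 1) / 2 = pos
    · rw [hjc, getD_set_self _ _ _ hlen]
      exact hii1 j hjl hj0 hjc
    · rw [getD_set_ne _ _ _ _ (show pos ≠ (j - 1) / 2 by omega)]
      exact hi j hj0 hjl hjpos hjc

-- correctness of CPython's _siftdown loop, relative to startpos s
theorem sd_spec (pos : Nat) (heap : List Int) (s : Nat) (newitem : Int)
    (hlen : pos < heap.length)
    (hi : ∀ j : Nat, 0 < j → j < heap.length → j ≠ pos → (j - 1) / 2 ≠ pos →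
        heap.getD ((j - 1) / 2) 0 ≤ heap.getD j 0)
    (hii : ∀ c : Nat, c < heap.length → 0 < c → (c - 1) / 2 = pos →
        newitem ≤ heap.getD c 0 ∧ (0 < pos → heap.getD ((pos - 1) / 2) 0 ≤ heap.getD c 0))
    (hiii : 0 < s → heap.getD ((s - 1) / 2) 0 ≤ newitem)
    (hanc : ∃ k, parentN k pos = s) :
    IsHeap (siftdownLoop heap s pos newitem) ∧
      ((siftdownLoop heap s pos newitem : List Int) : Multiset Int)
        = ((heap.set pos newitem : List Int) : Multiset Int) := by
  induction pos using Nat.strong_induction_on generalizing heap with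
  | _ pos ih =>
  have hspos : s ≤ pos := by
    obtain ⟨k, hk⟩ := hanc; rw [← hk]; exact parentN_le k pos
  rw [siftdownLoop]
  by_cases hlt : s < pos
  · rw [dif_pos hlt]
    have hp0 : 0 < pos := by omega
    have hpp : (pos - 1) / 2 < pos := by omega
    have hppl : (pos - 1) / 2 < heap.length := by omega
    by_cases hni : newitem < heap.getD ((pos - 1) / 2) 0
    · rw [if_pos hni]
      have hlen' : (pos - 1) / 2 < (heap.set pos (heap.getD ((pos - 1) / 2) 0)).length := by
        simpa using hppl
      have hedge : 0 < (pos - 1) / 2 →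
          heap.getD (((pos - 1) / 2 - 1) / 2) 0 ≤ heap.getD ((pos - 1) / 2) 0 := by
        intro h0
        exact hi ((pos - 1) / 2) h0 hppl (by omega) (by omega)
      have hi' : ∀ j : Nat, 0 < j → j < (heap.set pos (heap.getD ((pos - 1) / 2) 0)).length →
          j ≠ (pos - 1) / 2 → (j - 1) / 2 ≠ (pos - 1) / 2 →
          (heap.set pos (heap.getD ((pos - 1) / 2) 0)).getD ((j - 1) / 2) 0
            ≤ (heap.set pos (heap.getD ((pos - 1) / 2) 0)).getD j 0 := by
        intro j hj0 hjl hj1 hj2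
        rw [List.length_set] at hjl
        by_cases hjpos : j = pos
        · rw [hjpos] at hj2
          exact absurd rfl hj2
        · rw [getD_set_ne _ _ _ _ (show pos ≠ j by omega)]
          by_cases hjc : (j - 1) / 2 = pos
          · rw [hjc, getD_set_self _ _ _ hlen]
            exact (hii j hjl hj0 hjc).2 hp0
          · rw [getD_set_ne _ _ _ _ (show pos ≠ (j - 1) / 2 by omega)]
            exact hi j hj0 hjl hjpos hjc
      have hii' : ∀ c : Nat, c < (heap.set pos (heap.getD ((pos - 1) / 2) 0)).length → 0 < c →
          (c - 1) / 2 = (pos - 1) / 2 →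
          newitem ≤ (heap.set pos (heap.getD ((pos - 1) / 2) 0)).getD c 0 ∧
            (0 < (pos - 1) / 2 →
              (heap.set pos (heap.getD ((pos - 1) / 2) 0)).getD (((pos - 1) / 2 - 1) / 2) 0
                ≤ (heap.set pos (heap.getD ((pos - 1) / 2) 0)).getD c 0) := by
        intro c hcl hc0 hcp
        rw [List.length_set] at hcl
        have hgp : ∀ _h0 : 0 < (pos - 1) / 2,
            (heap.set pos (heap.getD ((pos - 1) / 2) 0)).getD (((pos - 1) / 2 - 1) / 2) 0
              = heap.getD (((pos - 1) / 2 - 1) / 2) 0 := by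
          intro h0; exact getD_set_ne _ _ _ _ (show pos ≠ ((pos - 1) / 2 - 1) / 2 by omega)
        by_cases hcpos : c = pos
        · subst hcpos
          rw [getD_set_self _ _ _ hlen]
          refine ⟨le_of_lt hni, fun h0 => ?_⟩
          rw [hgp h0]
          exact hedge h0
        · rw [getD_set_ne _ _ _ _ (show pos ≠ c by omega)]
          have hsib : heap.getD ((pos - 1) / 2) 0 ≤ heap.getD c 0 := by
            rw [← hcp]; exact hi c hc0 hcl hcpos (by omega)
          refine ⟨le_trans (le_of_lt hni) hsib, fun h0 => ?_⟩
          rw [hgp h0]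
          exact le_trans (hedge h0) hsib
      have hiii' : 0 < s →
          (heap.set pos (heap.getD ((pos - 1) / 2) 0)).getD ((s - 1) / 2) 0 ≤ newitem := by
        intro h0
        rw [getD_set_ne _ _ _ _ (show pos ≠ (s - 1) / 2 by omega)]
        exact hiii h0
      have hanc' : ∃ k, parentN k ((pos - 1) / 2) = s := by
        obtain ⟨k, hk⟩ := hanc
        cases k with
        | zero => exact absurd hk (by simp [parentN]; omega)
        | succ k => exact ⟨k, hk⟩
      obtain ⟨ha, hb⟩ := ih ((pos - 1) / 2) hpp _ hlen' hi' hii' hiii' hanc'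
      refine ⟨ha, hb.trans ?_⟩
      exact coe_set_set heap pos ((pos - 1) / 2) newitem (by omega) hlen hppl
    · rw [if_neg hni]
      exact ⟨setIsHeap heap pos newitem hlen hi (fun c hc h0 hcp => (hii c hc h0 hcp).1)
        (fun _ => le_of_not_gt hni), rfl⟩
  · rw [dif_neg hlt]
    have hps : pos = s := by omega
    refine ⟨setIsHeap heap pos newitem hlen hi (fun c hc h0 hcp => (hii c hc h0 hcp).1)
      (fun h0 => ?_), rfl⟩
    rw [hps]
    exact hiii (by omega)

-- correctness of CPython's _siftup hole-moving loop
theorem su_spec (heap : List Int) (pos endpos s : Nat) :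
    endpos = heap.length → pos < heap.length →
    (∀ j : Nat, 0 < j → j < heap.length → j ≠ pos → (j - 1) / 2 ≠ pos →
        heap.getD ((j - 1) / 2) 0 ≤ heap.getD j 0) →
    (∀ c : Nat, c < heap.length → 0 < c → (c - 1) / 2 = pos → 0 < pos →
        heap.getD ((pos - 1) / 2) 0 ≤ heap.getD c 0) →
    (∃ k, parentN k pos = s) →
    (siftupLoop heap pos endpos).1.length = heap.length ∧
      pos ≤ (siftupLoop heap pos endpos).2 ∧
      (siftupLoop heap pos endpos).2 < heap.length ∧
      heap.length ≤ 2 * (siftupLoop heap pos endpos).2 + 1 ∧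
      (∃ k, parentN k (siftupLoop heap pos endpos).2 = s) ∧
      (∀ j : Nat, 0 < j → j < heap.length → j ≠ (siftupLoop heap pos endpos).2 →
          (j - 1) / 2 ≠ (siftupLoop heap pos endpos).2 →
          (siftupLoop heap pos endpos).1.getD ((j - 1) / 2) 0
            ≤ (siftupLoop heap pos endpos).1.getD j 0) ∧
      (∀ c : Nat, c < heap.length → 0 < c → (c - 1) / 2 = (siftupLoop heap pos endpos).2 →
          0 < (siftupLoop heap pos endpos).2 →
          (siftupLoop heap pos endpos).1.getD (((siftupLoop heap pos endpos).2 - 1) / 2) 0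
            ≤ (siftupLoop heap pos endpos).1.getD c 0) ∧
      (∀ m : Nat, m < pos → (siftupLoop heap pos endpos).1.getD m 0 = heap.getD m 0) ∧
      (∀ x : Int, (((siftupLoop heap pos endpos).1.set (siftupLoop heap pos endpos).2 x : List Int) : Multiset Int)
          = ((heap.set pos x : List Int) : Multiset Int)) := by
  fun_induction siftupLoop heap pos endpos with
  | case1 heap pos childpos0 hcp rightpos cp ih =>
    intro hend hlen hi hii hanc
    have hc0def : childpos0 = 2 * pos + 1 := rfl
    have hrdef : rightpos = childpos0 + 1 := rfl
    have hcpdef : cp = if _h : rightpos < endpos ∧ ¬heap.getD childpos0 0 < heap.getD rightpos 0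
        then rightpos else childpos0 := rfl
    have hcpl : cp < endpos := by
      rw [hcpdef]
      split_ifs with hc
      · exact hc.1
      · exact hcp
    have hcpchild : cp = 2 * pos + 1 ∨ cp = 2 * pos + 2 := by
      rw [hcpdef]
      split_ifs with hc
      · right; omega
      · left; omega
    have hcppar : (cp - 1) / 2 = pos := by
      rcases hcpchild with h | h <;> omega
    have hpcp : pos < cp := by rcases hcpchild with h | h <;> omega
    have hcplen : cp < heap.length := by omega
    have hmin : ∀ oth : Nat, oth < heap.length → (oth = 2 * pos + 1 ∨ oth = 2 * pos + 2) →
        oth ≠ cp → heap.getD cp 0 ≤ heap.getD oth 0 := by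
      intro oth hothl hoth hne
      by_cases hc : rightpos < endpos ∧ ¬heap.getD childpos0 0 < heap.getD rightpos 0
      · have he : cp = rightpos := by rw [hcpdef, dif_pos hc]
        rcases hoth with h | h
        · rw [he, h, show (2 * pos + 1 : Nat) = childpos0 from hc0def.symm]
          exact le_of_not_gt hc.2
        · exact (hne (by omega)).elim
      · have he : cp = childpos0 := by rw [hcpdef, dif_neg hc]
        rcases hoth with h | h
        · exact (hne (by omega)).elim
        · rw [he, h, show (2 * pos + 2 : Nat) = rightpos by omega]
          rcases not_and_or.mp hc with h1 | h2
          · exact absurd (show rightpos < endpos by omega) h1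
          · exact le_of_lt (not_not.mp h2)
    set heap' := heap.set pos (heap.getD cp 0) with hheap'
    have hlen' : heap'.length = heap.length := by simp [hheap']
    have hi' : ∀ j : Nat, 0 < j → j < heap'.length → j ≠ cp → (j - 1) / 2 ≠ cp →
        heap'.getD ((j - 1) / 2) 0 ≤ heap'.getD j 0 := by
      intro j hj0 hjl hj1 hj2
      rw [hlen'] at hjl
      by_cases hjpos : j = pos
      · subst hjpos
        rw [hheap', getD_set_self _ _ _ hlen,
          getD_set_ne _ _ _ _ (show j ≠ (j - 1) / 2 by omega)]
        exact hii cp hcplen (by omega) hcppar (by omega)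
      · rw [hheap', getD_set_ne _ _ _ _ (show pos ≠ j by omega)]
        by_cases hjc : (j - 1) / 2 = pos
        · rw [hjc, getD_set_self _ _ _ hlen]
          exact hmin j hjl (by omega) hj1
        · rw [getD_set_ne _ _ _ _ (show pos ≠ (j - 1) / 2 by omega)]
          exact hi j hj0 hjl hjpos hjc
    have hii' : ∀ c : Nat, c < heap'.length → 0 < c → (c - 1) / 2 = cp → 0 < cp →
        heap'.getD ((cp - 1) / 2) 0 ≤ heap'.getD c 0 := by
      intro c hcl hc0 hcpar _hcp0
      rw [hlen'] at hcl
      rw [hheap', hcppar, getD_set_self _ _ _ hlen,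
        getD_set_ne _ _ _ _ (show pos ≠ c by omega)]
      rw [show cp = (c - 1) / 2 by omega]
      exact hi c hc0 hcl (by omega) (by omega)
    have hanc' : ∃ k, parentN k cp = s := by
      obtain ⟨k, hk⟩ := hanc
      exact ⟨k + 1, by show parentN k ((cp - 1) / 2) = s; rw [hcppar]; exact hk⟩
    obtain ⟨ra, rb, rc, rd, re, rf, rg, rh, ri⟩ :=
      ih (by rw [hend, hlen']) (by omega) hi' hii' hanc'
    rw [hlen'] at ra rc rd rf rg
    refine ⟨ra, by omega, rc, rd, re, rf, rg, ?_, ?_⟩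
    · intro m hm
      rw [rh m (by omega), hheap']
      exact getD_set_ne _ _ _ _ (show pos ≠ m by omega)
    · intro x
      rw [ri x, hheap']
      exact coe_set_set heap pos cp x (by omega) hlen hcplen
  | case2 heap pos childpos0 hcp =>
    intro hend hlen hi hii hanc
    have hc0def : childpos0 = 2 * pos + 1 := rfl
    refine ⟨rfl, le_refl _, hlen, by omega, hanc, hi, hii,
      fun m _ => rfl, fun x => rfl⟩

-- CPython _siftup restores the heap when only position pos may be out of order
theorem pySiftup_spec (heap : List Int) (pos : Nat)
    (hlen : pos < heap.length)
    (hi : ∀ j : Nat, 0 < j → j < heap.length → j ≠ pos → (j - 1) / 2 ≠ pos →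
        heap.getD ((j - 1) / 2) 0 ≤ heap.getD j 0)
    (hii : ∀ c : Nat, c < heap.length → 0 < c → (c - 1) / 2 = pos → 0 < pos →
        heap.getD ((pos - 1) / 2) 0 ≤ heap.getD c 0)
    (hiii : 0 < pos → heap.getD ((pos - 1) / 2) 0 ≤ heap.getD pos 0) :
    IsHeap (pySiftup heap pos) ∧
      ((pySiftup heap pos : List Int) : Multiset Int) = (heap : Multiset Int) := by
  obtain ⟨ra, rb, rc, rd, re, rf, rg, rh, ri⟩ :=
    su_spec heap pos heap.length pos rfl hlen hi hii ⟨0, rfl⟩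
  set r := siftupLoop heap pos heap.length with hr
  set newitem := heap.getD pos 0 with hni
  have hres : pySiftup heap pos
      = siftdownLoop (r.1.set r.2 newitem) pos r.2 ((r.1.set r.2 newitem).getD r.2 0) := rfl
  have hrd : (r.1.set r.2 newitem).getD r.2 0 = newitem :=
    getD_set_self _ _ _ (by rw [ra]; omega)
  rw [hres, hrd]
  have hlen2 : r.2 < (r.1.set r.2 newitem).length := by simp [ra]; omega
  have hval : ∀ j : Nat, j ≠ r.2 → (r.1.set r.2 newitem).getD j 0 = r.1.getD j 0 := by
    intro j hj; exact getD_set_ne _ _ _ _ (fun h => hj h.symm)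
  have hi2 : ∀ j : Nat, 0 < j → j < (r.1.set r.2 newitem).length → j ≠ r.2 →
      (j - 1) / 2 ≠ r.2 → (r.1.set r.2 newitem).getD ((j - 1) / 2) 0
        ≤ (r.1.set r.2 newitem).getD j 0 := by
    intro j hj0 hjl hj1 hj2
    rw [List.length_set, ra] at hjl
    rw [hval j hj1, hval _ hj2]
    exact rf j hj0 hjl hj1 hj2
  have hii2 : ∀ c : Nat, c < (r.1.set r.2 newitem).length → 0 < c → (c - 1) / 2 = r.2 →
      newitem ≤ (r.1.set r.2 newitem).getD c 0 ∧
        (0 < r.2 → (r.1.set r.2 newitem).getD ((r.2 - 1) / 2) 0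
          ≤ (r.1.set r.2 newitem).getD c 0) := by
    intro c hcl hc0 hcp
    rw [List.length_set, ra] at hcl
    omega
  have hiii2 : 0 < pos → (r.1.set r.2 newitem).getD ((pos - 1) / 2) 0 ≤ newitem := by
    intro h0
    rw [hval _ (by omega), rh ((pos - 1) / 2) (by omega)]
    exact hiii h0
  obtain ⟨ha, hb⟩ := sd_spec r.2 (r.1.set r.2 newitem) pos newitem hlen2 hi2 hii2 hiii2 re
  refine ⟨ha, hb.trans ?_⟩
  rw [List.set_set]
  rw [ri newitem]
  have : heap.set pos newitem = heap := by
    rw [hni, getD_eq_getElem _ _ hlen]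
    exact List.set_getElem_self hlen
  rw [this]

-- heappush on a heap: still a heap, multiset gains the new item
theorem pyHeappush_spec (heap : List Int) (x : Int) (hh : IsHeap heap) :
    IsHeap (pyHeappush heap x) ∧
      ((pyHeappush heap x : List Int) : Multiset Int) = x ::ₘ (heap : Multiset Int) := by
  have hres : pyHeappush heap x
      = siftdownLoop (heap ++ [x]) 0 heap.length ((heap ++ [x]).getD heap.length 0) := by
    unfold pyHeappush pySiftdown
    simp
  have hgd : (heap ++ [x]).getD heap.length 0 = x := getD_append_right heap x
  rw [hres, hgd]
  have hlen : heap.length < (heap ++ [x]).length := by simp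
  have hi : ∀ j : Nat, 0 < j → j < (heap ++ [x]).length → j ≠ heap.length →
      (j - 1) / 2 ≠ heap.length → (heap ++ [x]).getD ((j - 1) / 2) 0
        ≤ (heap ++ [x]).getD j 0 := by
    intro j hj0 hjl hj1 _hj2
    rw [List.length_append, List.length_singleton] at hjl
    rw [getD_append_left _ _ _ (by omega), getD_append_left _ _ _ (by omega)]
    exact hh j hj0 (by omega)
  have hii : ∀ c : Nat, c < (heap ++ [x]).length → 0 < c → (c - 1) / 2 = heap.length →
      x ≤ (heap ++ [x]).getD c 0 ∧ (0 < heap.length →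
        (heap ++ [x]).getD ((heap.length - 1) / 2) 0 ≤ (heap ++ [x]).getD c 0) := by
    intro c hcl hc0 hcp
    rw [List.length_append, List.length_singleton] at hcl
    omega
  obtain ⟨ha, hb⟩ := sd_spec heap.length (heap ++ [x]) 0 x hlen hi hii
    (fun h0 => absurd h0 (by omega)) (parentN_zero heap.length)
  refine ⟨ha, hb.trans ?_⟩
  have hx : (heap ++ [x])[heap.length]'hlen = x := by simp
  have hself := List.set_getElem_self hlen
  rw [hx] at hself
  rw [hself]
  rw [Multiset.cons_coe]
  exact Multiset.coe_eq_coe.mpr (List.perm_append_singleton x heap)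

-- heappop on a nonempty heap: returns the root (= the minimum), rest is still a heap
theorem pyHeappop_spec (heap : List Int) (hne : heap ≠ []) (hh : IsHeap heap) :
    (pyHeappop heap).1 = heap.getD 0 0 ∧ IsHeap (pyHeappop heap).2 ∧
      (pyHeappop heap).1 ::ₘ ((pyHeappop heap).2 : Multiset Int) = (heap : Multiset Int) := by
  have hlast : heap.dropLast ++ [heap.getLastD 0] = heap := by
    have h1 : heap.getLastD 0 = heap.getLast hne := by
      simp [List.getLastD_eq_getLast?, List.getLast?_eq_some_getLast hne]
    rw [h1]
    exact List.dropLast_append_getLast hne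
  by_cases hrest : heap.dropLast = []
  · have hres : pyHeappop heap = (heap.getLastD 0, heap.dropLast) := by
      unfold pyHeappop; simp [hrest]
    have hone : heap = [heap.getLastD 0] := by rw [← hlast, hrest]; rfl
    rw [hres]
    constructor
    · conv_rhs => rw [hone]
      rfl
    constructor
    · intro j hj0 hjl
      rw [hrest] at hjl
      simp at hjl
    · rw [hrest]
      conv_rhs => rw [hone]
      rfl
  · have hres : pyHeappop heap
        = (heap.dropLast.getD 0 0, pySiftup (heap.dropLast.set 0 (heap.getLastD 0)) 0) := by
      unfold pyHeappop; simp [hrest]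
    have hdl : 0 < heap.dropLast.length := List.length_pos_iff.mpr hrest
    have hlen : heap.dropLast.length = heap.length - 1 := heap.length_dropLast
    have hset : (heap.dropLast.set 0 (heap.getLastD 0)).length = heap.dropLast.length := by simp
    obtain ⟨ha, hb⟩ := pySiftup_spec (heap.dropLast.set 0 (heap.getLastD 0)) 0
      (by omega)
      (by
        intro j hj0 hjl hj1 hj2
        rw [hset] at hjl
        rw [getD_set_ne _ _ _ _ (show (0 : Nat) ≠ (j - 1) / 2 by omega),
          getD_set_ne _ _ _ _ (show (0 : Nat) ≠ j by omega),
          getD_dropLast _ _ (by omega), getD_dropLast _ _ (by omega)]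
        exact hh j hj0 (by omega))
      (fun c _ _ _ h0 => absurd h0 (by omega))
      (fun h0 => absurd h0 (by omega))
    rw [hres]
    refine ⟨?_, ha, ?_⟩
    · show heap.dropLast.getD 0 0 = heap.getD 0 0
      exact getD_dropLast _ _ (by omega)
    · rw [hb]
      have e1 := coe_set heap.dropLast 0 (heap.getLastD 0) hdl
      have e2 : ((heap.dropLast : List Int) : Multiset Int) + {heap.getLastD 0}
          = (heap : Multiset Int) := by
        conv_rhs => rw [← hlast]
        rw [show ((heap.dropLast ++ [heap.getLastD 0] : List Int) : Multiset Int)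
          = (heap.dropLast : Multiset Int) + ([heap.getLastD 0] : List Int) from rfl]
        rfl
      rw [← e2, ← e1]
      rw [← Multiset.singleton_add]
      abel

-- heapify's foldl: on an already-valid heap each _siftup keeps heap + multiset
theorem foldl_siftup (idxs : List Nat) (x : List Int) (hh : IsHeap x)
    (hidx : ∀ i ∈ idxs, i < x.length) :
    IsHeap (idxs.foldl (fun h i => pySiftup h i) x) ∧
      ((idxs.foldl (fun h i => pySiftup h i) x : List Int) : Multiset Int)
        = (x : Multiset Int) := by
  induction idxs generalizing x with
  | nil => exact ⟨hh, rfl⟩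
  | cons i t ih =>
    simp only [List.foldl_cons]
    have hil : i < x.length := hidx i (by simp)
    obtain ⟨ha, hb⟩ := pySiftup_spec x i hil
      (fun j hj0 hjl _ _ => hh j hj0 hjl)
      (fun c hcl hc0 hcp h0 => le_trans (hh i h0 hil) (by rw [← hcp]; exact hh c hc0 hcl))
      (fun h0 => hh i h0 hil)
    have hlen : (pySiftup x i).length = x.length := length_pySiftup x i
    obtain ⟨hc, hd⟩ := ih (pySiftup x i) ha (fun j hj => by rw [hlen]; exact hidx j (by simp [hj]))
    exact ⟨hc, hd.trans hb⟩

theorem pyHeapify_spec (x : List Int) (hh : IsHeap x) :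
    IsHeap (pyHeapify x) ∧ ((pyHeapify x : List Int) : Multiset Int) = (x : Multiset Int) := by
  unfold pyHeapify
  exact foldl_siftup _ x hh (by
    intro i hi
    rw [List.mem_reverse, List.mem_range] at hi
    omega)

-- a Pairwise-(≤) list satisfies the heap shape
theorem pairwise_isHeap (l : List Int) (hp : l.Pairwise (· ≤ ·)) : IsHeap l := by
  intro j hj0 hjl
  rw [getD_eq_getElem _ _ (by omega), getD_eq_getElem _ _ hjl]
  exact List.pairwise_iff_getElem.mp hp _ _ (by omega) hjl (by omega)

theorem pairwise_getD_mono (l : List Int) (hp : l.Pairwise (· ≤ ·)) (i j : Nat)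
    (hij : i ≤ j) (hj : j < l.length) : l.getD i 0 ≤ l.getD j 0 := by
  rcases Nat.eq_or_lt_of_le hij with h | h
  · subst h; exact le_refl _
  · rw [getD_eq_getElem _ _ (by omega), getD_eq_getElem _ _ hj]
    exact List.pairwise_iff_getElem.mp hp _ _ (by omega) hj h

theorem pairwise_head_le (l : List Int) (hp : l.Pairwise (· ≤ ·)) (x : Int) (hx : x ∈ l) :
    l.getD 0 0 ≤ x := by
  obtain ⟨j, hj, rfl⟩ := List.mem_iff_getElem.mp hx
  rw [← getD_eq_getElem l j hj]
  exact pairwise_getD_mono l hp 0 j (by omega) hj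

-- a heap and a sorted list over the same multiset have the same front element
theorem heap_head_eq (h g : List Int) (hh : IsHeap h) (hg : g.Pairwise (· ≤ ·))
    (hne : g ≠ []) (hperm : (h : Multiset Int) = (g : Multiset Int)) :
    h.getD 0 0 = g.getD 0 0 := by
  have hp : h.Perm g := Multiset.coe_eq_coe.mp hperm
  have hlg : 0 < g.length := List.length_pos_iff.mpr hne
  have hlh : 0 < h.length := by rw [hp.length_eq]; exact hlg
  have hmh : h.getD 0 0 ∈ h := by
    rw [getD_eq_getElem _ _ hlh]; exact List.getElem_mem hlh
  have hmg : g.getD 0 0 ∈ g := by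
    rw [getD_eq_getElem _ _ hlg]; exact List.getElem_mem hlg
  exact le_antisymm
    (heap_root_le_mem h hh _ (hp.symm.subset hmg))
    (pairwise_head_le g hg _ (hp.subset hmh))

-- binary-search loop of the ghost: invariant and postcondition
theorem bisLoop_spec (rest : List Int) (t : Int) (hp : rest.Pairwise (· ≤ ·)) :
    ∀ lo hi : Nat, lo ≤ hi → hi ≤ rest.length →
    (∀ i : Nat, i < lo → rest.getD i 0 < t) →
    (∀ i : Nat, hi ≤ i → i < rest.length → t ≤ rest.getD i 0) →
    lo ≤ bisLoop rest t lo hi ∧ bisLoop rest t lo hi ≤ hi ∧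
      (∀ i : Nat, i < bisLoop rest t lo hi → rest.getD i 0 < t) ∧
      (∀ i : Nat, bisLoop rest t lo hi ≤ i → i < rest.length → t ≤ rest.getD i 0) := by
  intro lo hi
  fun_induction bisLoop rest t lo hi with
  | case1 lo hi hlt mid hmid ih =>
    intro hlohi hhil hbelow habove
    have hmdef : mid = (lo + hi) / 2 := rfl
    have h1 : lo ≤ mid + 1 := by omega
    have h2 : mid + 1 ≤ hi := by omega
    obtain ⟨ra, rb, rc, rd⟩ := ih h2 hhil
      (by
        intro i hi2
        exact lt_of_le_of_lt (pairwise_getD_mono rest hp i mid (by omega) (by omega)) hmid)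
      habove
    exact ⟨by omega, rb, rc, rd⟩
  | case2 lo hi hlt mid hmid ih =>
    intro hlohi hhil hbelow habove
    have hmdef : mid = (lo + hi) / 2 := rfl
    obtain ⟨ra, rb, rc, rd⟩ := ih (by omega) (by omega) hbelow
      (by
        intro i hi2 hil
        exact le_trans (le_of_not_gt hmid) (pairwise_getD_mono rest hp mid i (by omega) hil))
    exact ⟨ra, by omega, rc, rd⟩
  | case3 lo hi hge =>
    intro hlohi hhil hbelow habove
    exact ⟨le_refl _, by omega, hbelow, fun i h1 h2 => habove i (by omega) h2⟩

-- inserting at the bisect position keeps the ghost list sorted, adds t to the multiset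
theorem insert_bis_spec (rest : List Int) (t : Int) (hp : rest.Pairwise (· ≤ ·)) :
    (PySem.List.insert rest ((bisLoop rest t 0 rest.length : Nat) : Int) t).Pairwise (· ≤ ·) ∧
      ((PySem.List.insert rest ((bisLoop rest t 0 rest.length : Nat) : Int) t : List Int) : Multiset Int)
        = t ::ₘ (rest : Multiset Int) := by
  obtain ⟨_, rb, rc, rd⟩ := bisLoop_spec rest t hp 0 rest.length (by omega) (le_refl _)
    (fun i h => absurd h (by omega)) (fun i h1 h2 => absurd h1 (by omega))
  set lo := bisLoop rest t 0 rest.length with hlo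
  rw [PySem.List.insert_natCast rest lo t rb]
  constructor
  · rw [List.pairwise_append]
    refine ⟨hp.sublist (List.take_sublist _ _), ?_, ?_⟩
    · rw [List.pairwise_cons]
      refine ⟨?_, hp.sublist (List.drop_sublist _ _)⟩
      intro y hy
      rw [List.mem_drop_iff_getElem] at hy
      obtain ⟨i, hilen, rfl⟩ := hy
      rw [← getD_eq_getElem _ _ (by omega)]
      exact rd (lo + i) (by omega) (by omega)
    · intro a ha b hb
      rw [List.mem_take_iff_getElem] at ha
      obtain ⟨i, hi1, rfl⟩ := ha
      have halt : rest[i] < t := by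
        rw [← getD_eq_getElem _ _ (by omega)]
        exact rc i (by omega)
      rcases List.mem_cons.mp hb with rfl | hb2
      · exact le_of_lt halt
      · rw [List.mem_drop_iff_getElem] at hb2
        obtain ⟨k, hk1, rfl⟩ := hb2
        refine le_of_lt (lt_of_lt_of_le halt ?_)
        rw [← getD_eq_getElem _ _ (by omega)]
        exact rd (lo + k) (by omega) (by omega)
  · rw [show ((rest.take lo ++ t :: rest.drop lo : List Int) : Multiset Int)
      = (rest.take lo : Multiset Int) + (t ::ₘ (rest.drop lo : Multiset Int)) from rfl]
    have : (rest : Multiset Int) = (rest.take lo : Multiset Int) + (rest.drop lo : Multiset Int) := by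
      conv_lhs => rw [← List.take_append_drop lo rest]
      rfl
    rw [this]
    rw [← Multiset.singleton_add, ← Multiset.singleton_add]
    abel

-- one-step unfoldings of A's loop and the ghost loop
theorem solutionLoop_zero (heap : List Int) (K ans : Int) :
    solutionLoop 0 heap K ans = -1 := rfl

theorem solutionLoop_base (fuel : Nat) (heap : List Int) (K ans : Int) (h : heap.length ≤ 1) :
    solutionLoop (fuel + 1) heap K ans = -1 := by
  rw [solutionLoop]; rw [if_pos h]

theorem solutionLoop_step (fuel : Nat) (heap : List Int) (K ans : Int) (h : ¬ heap.length ≤ 1) :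
    solutionLoop (fuel + 1) heap K ans =
      if (pyHeappush (pyHeappop (pyHeappop heap).2).2
            ((pyHeappop heap).1 + (pyHeappop (pyHeappop heap).2).1 * 2)).getD 0 0 ≥ K
      then ans + 1
      else solutionLoop fuel (pyHeappush (pyHeappop (pyHeappop heap).2).2
            ((pyHeappop heap).1 + (pyHeappop (pyHeappop heap).2).1 * 2)) K (ans + 1) := by
  rw [solutionLoop]; rw [if_neg h]

theorem ghostLoop_zero (lst : List Int) (K ans : Int) :
    ghostLoop 0 lst K ans = -1 := rfl

theorem ghostLoop_base (fuel : Nat) (lst : List Int) (K ans : Int) (h : ¬ 1 < lst.length) :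
    ghostLoop (fuel + 1) lst K ans = -1 := by
  rw [ghostLoop]; rw [if_neg h]

theorem ghostLoop_step (fuel : Nat) (lst : List Int) (K ans : Int) (h : 1 < lst.length) :
    ghostLoop (fuel + 1) lst K ans =
      if (PySem.List.insert (PySem.List.slice lst (some 2) none)
            ((bisLoop (PySem.List.slice lst (some 2) none) (lst.getD 0 0 + 2 * lst.getD 1 0) 0
              (PySem.List.slice lst (some 2) none).length : Nat) : Int)
            (lst.getD 0 0 + 2 * lst.getD 1 0)).getD 0 0 ≥ K
      then ans + 1
      else ghostLoop fuel (PySem.List.insert (PySem.List.slice lst (some 2) none)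
            ((bisLoop (PySem.List.slice lst (some 2) none) (lst.getD 0 0 + 2 * lst.getD 1 0) 0
              (PySem.List.slice lst (some 2) none).length : Nat) : Int)
            (lst.getD 0 0 + 2 * lst.getD 1 0)) K (ans + 1) := by
  rw [ghostLoop]; rw [if_pos h]

-- the A-side simulation: A's heap loop and the ghost sorted-list loop agree whenever the
-- heap and the sorted list carry the same multiset
theorem loop_eq : ∀ (n : Nat) (hA lB : List Int) (K ans : Int),
    hA.length = n → IsHeap hA → lB.Pairwise (· ≤ ·) →
    (hA : Multiset Int) = (lB : Multiset Int) →
    solutionLoop n hA K ans = ghostLoop n lB K ans := by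
  intro n
  induction n using Nat.strong_induction_on with
  | _ n ih =>
  intro hA lB K ans hlen hh hp hperm
  have hlB : lB.length = n := by
    have := congrArg Multiset.card hperm
    rw [Multiset.coe_card, Multiset.coe_card, hlen] at this
    omega
  by_cases hn : n ≤ 1
  · rcases n with _ | m
    · rw [solutionLoop_zero, ghostLoop_zero]
    · rw [solutionLoop_base _ _ _ _ (by omega), ghostLoop_base _ _ _ _ (by omega)]
  · obtain ⟨m, rfl⟩ : ∃ m, n = m + 1 := ⟨n - 1, by omega⟩
    rcases lB with _ | ⟨b0, lB'⟩
    · simp at hlB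
    rcases lB' with _ | ⟨b1, bt⟩
    · simp at hlB
      omega
    have hp1 := (List.pairwise_cons.mp hp).1
    have hp2 := (List.pairwise_cons.mp hp).2
    have hAne : hA ≠ [] := by
      intro e; rw [e] at hlen; simp at hlen
    obtain ⟨q1, q2, q3⟩ := pyHeappop_spec hA hAne hh
    have hfst : (pyHeappop hA).1 = b0 := by
      rw [q1, heap_head_eq hA (b0 :: b1 :: bt) hh hp (by simp) hperm]
      rfl
    have h2len : (pyHeappop hA).2.length = m := by
      rw [length_pyHeappop, hlen]
      omega
    have h2ne : (pyHeappop hA).2 ≠ [] := by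
      intro e; rw [e] at h2len; simp at h2len; omega
    obtain ⟨r1, r2, r3⟩ := pyHeappop_spec _ h2ne q2
    have hperm2 : (((pyHeappop hA).2 : List Int) : Multiset Int)
        = ((b1 :: bt : List Int) : Multiset Int) := by
      have hq := q3
      rw [hfst, hperm] at hq
      rw [show ((b0 :: b1 :: bt : List Int) : Multiset Int)
        = b0 ::ₘ ((b1 :: bt : List Int) : Multiset Int) from rfl] at hq
      exact (Multiset.cons_inj_right b0).mp hq
    have hsnd : (pyHeappop (pyHeappop hA).2).1 = b1 := by
      rw [r1, heap_head_eq _ (b1 :: bt) q2 hp2 (by simp) hperm2]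
      rfl
    have hperm3 : (((pyHeappop (pyHeappop hA).2).2 : List Int) : Multiset Int)
        = ((bt : List Int) : Multiset Int) := by
      have hq := r3
      rw [hsnd, hperm2] at hq
      rw [show ((b1 :: bt : List Int) : Multiset Int)
        = b1 ::ₘ ((bt : List Int) : Multiset Int) from rfl] at hq
      exact (Multiset.cons_inj_right b1).mp hq
    obtain ⟨s1, s2⟩ := pyHeappush_spec (pyHeappop (pyHeappop hA).2).2 (b0 + b1 * 2) r2
    have hslice : PySem.List.slice (b0 :: b1 :: bt) (some 2) none = bt := by
      have := PySem.List.slice_from_natCast (b0 :: b1 :: bt) 2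
      simpa using this
    have htemp : (b0 : Int) + 2 * b1 = b0 + b1 * 2 := by ring
    have hpbt : bt.Pairwise (· ≤ ·) := (List.pairwise_cons.mp hp2).2
    obtain ⟨t1, t2⟩ := insert_bis_spec bt (b0 + b1 * 2) hpbt
    have hpushm : ((pyHeappush (pyHeappop (pyHeappop hA).2).2 (b0 + b1 * 2) : List Int) : Multiset Int)
        = ((PySem.List.insert bt ((bisLoop bt (b0 + b1 * 2) 0 bt.length : Nat) : Int) (b0 + b1 * 2) : List Int) : Multiset Int) := by
      rw [s2, hperm3, t2]
    have hinsne : PySem.List.insert bt ((bisLoop bt (b0 + b1 * 2) 0 bt.length : Nat) : Int) (b0 + b1 * 2) ≠ [] := by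
      intro e
      have := PySem.List.length_insert bt ((bisLoop bt (b0 + b1 * 2) 0 bt.length : Nat) : Int) (b0 + b1 * 2)
      rw [e] at this
      simp at this
    have hhead : (pyHeappush (pyHeappop (pyHeappop hA).2).2 (b0 + b1 * 2)).getD 0 0
        = (PySem.List.insert bt ((bisLoop bt (b0 + b1 * 2) 0 bt.length : Nat) : Int) (b0 + b1 * 2)).getD 0 0 :=
      heap_head_eq _ _ s1 t1 hinsne hpushm
    rw [solutionLoop_step _ _ _ _ (by omega), ghostLoop_step _ _ _ _ (by simp)]
    rw [hfst, hsnd, hslice]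
    rw [show ((b0 :: b1 :: bt : List Int).getD 0 0) = b0 from rfl,
      show ((b0 :: b1 :: bt : List Int).getD 1 0) = b1 from rfl, htemp, hhead]
    split_ifs with hK
    · rfl
    · apply ih m (by omega)
      · rw [length_pyHeappush, length_pyHeappop, h2len]
        omega
      · exact s1
      · exact t1
      · rw [s2, hperm3, t2]

-- ---- B-side lemmas: the arg-min scan, popping, and the min() check ----

-- removing index n removes exactly the value at n from the multiset
theorem coe_eraseIdx (l : List Int) (n : Nat) (h : n < l.length) :
    ((l.eraseIdx n : List Int) : Multiset Int) + {l[n]} = (l : Multiset Int) := by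
  have h2 : l.take n ++ l[n] :: l.drop (n + 1) = l := by
    rw [List.getElem_cons_drop, List.take_append_drop]
  rw [List.eraseIdx_eq_take_drop_succ]
  conv_rhs => rw [← h2]
  simp only [← Multiset.coe_add, ← Multiset.cons_coe]
  simp only [← Multiset.singleton_add]
  abel

-- the fold of the arg-min scan keeps an in-range index of a minimal element
theorem argmin_fold_spec (bag : List Int) : ∀ (n : Nat) (a k : Int),
    ((bag.length : Int) - a).toNat = n → 0 ≤ k → k < a → a ≤ (bag.length : Int) →
    (∀ j : Nat, (j : Int) < a → bag.getD k.toNat 0 ≤ bag.getD j 0) →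
    0 ≤ ((PySem.List.pyRange a (bag.length : Int) 1).foldl
          (fun k i => if PySem.List.pyGetD bag i 0 < PySem.List.pyGetD bag k 0 then i else k) k) ∧
    ((PySem.List.pyRange a (bag.length : Int) 1).foldl
          (fun k i => if PySem.List.pyGetD bag i 0 < PySem.List.pyGetD bag k 0 then i else k) k)
        < (bag.length : Int) ∧
    (∀ j : Nat, j < bag.length →
      bag.getD ((PySem.List.pyRange a (bag.length : Int) 1).foldl
          (fun k i => if PySem.List.pyGetD bag i 0 < PySem.List.pyGetD bag k 0 then i else k) k).toNat 0
        ≤ bag.getD j 0) := by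
  intro n
  induction n with
  | zero =>
    intro a k hn hk0 hka hal hmin
    have hba : (bag.length : Int) ≤ a := by omega
    rw [PySem.List.pyRange_one_eq_nil hba]
    simp only [List.foldl_nil]
    refine ⟨hk0, by omega, ?_⟩
    intro j hj
    exact hmin j (by omega)
  | succ n ihn =>
    intro a k hn hk0 hka hal hmin
    have hab : a < (bag.length : Int) := by omega
    rw [PySem.List.pyRange_one_cons hab]
    rw [List.foldl_cons]
    have ha0 : 0 ≤ a := by omega
    have hga : PySem.List.pyGetD bag a 0 = bag.getD a.toNat 0 := by
      rw [PySem.List.pyGetD_eq_getElem bag 0 ha0 hab, getD_eq_getElem bag a.toNat (by omega)]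
    have hgk : PySem.List.pyGetD bag k 0 = bag.getD k.toNat 0 := by
      rw [PySem.List.pyGetD_eq_getElem bag 0 hk0 (by omega), getD_eq_getElem bag k.toNat (by omega)]
    rw [hga, hgk]
    by_cases hlt : bag.getD a.toNat 0 < bag.getD k.toNat 0
    · rw [if_pos hlt]
      apply ihn (a + 1) a (by omega) ha0 (by omega) (by omega)
      intro j hj
      by_cases hje : (j : Int) < a
      · exact le_trans (le_of_lt hlt) (hmin j hje)
      · have : j = a.toNat := by omega
        subst this
        exact le_refl _
    · rw [if_neg hlt]
      apply ihn (a + 1) k (by omega) hk0 (by omega) (by omega)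
      intro j hj
      by_cases hje : (j : Int) < a
      · exact hmin j hje
      · have : j = a.toNat := by omega
        subst this
        exact le_of_not_gt hlt

theorem argmin_spec (bag : List Int) (hne : bag ≠ []) :
    0 ≤ argmin bag ∧ argmin bag < (bag.length : Int) ∧
      ∀ j : Nat, j < bag.length → bag.getD (argmin bag).toNat 0 ≤ bag.getD j 0 := by
  have hlen : 0 < bag.length := List.length_pos_iff.mpr hne
  have hlenI : PySem.List.len bag = (bag.length : Int) := by
    simp [PySem.List.len_eq]
  unfold argmin
  rw [hlenI]
  apply argmin_fold_spec bag (bag.length - 1) 1 0 (by omega) (by omega) (by omega)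
    (by exact_mod_cast (by omega : (1 : Int) ≤ (bag.length : Int)))
  intro j hj
  have : j = 0 := by omega
  subst this
  exact le_refl _

-- popping at the arg-min of a bag that is (as a multiset) m :: t with m :: t sorted
-- returns m and leaves a bag carrying t
theorem pop_argmin_spec (bag : List Int) (m : Int) (t : List Int)
    (hp : (m :: t).Pairwise (· ≤ ·))
    (hperm : (bag : Multiset Int) = ((m :: t : List Int) : Multiset Int)) :
    ∃ rest : List Int, PySem.List.pop? bag (argmin bag) = some (m, rest) ∧
      (rest : Multiset Int) = (t : Multiset Int) := by
  have hpm : bag.Perm (m :: t) := Multiset.coe_eq_coe.mp hperm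
  have hne : bag ≠ [] := by
    intro e; subst e
    exact absurd hpm.symm.eq_nil (by simp)
  obtain ⟨h0, h1, h2⟩ := argmin_spec bag hne
  set kn := (argmin bag).toNat with hkn
  have hknl : kn < bag.length := by omega
  have hcast : argmin bag = (kn : Int) := by omega
  have hval : bag[kn] = m := by
    have hmem : bag[kn] ∈ bag := List.getElem_mem hknl
    have hmem' : bag[kn] ∈ m :: t := hpm.subset hmem
    have hup : m ≤ bag[kn] := by
      have := pairwise_head_le (m :: t) hp _ hmem'
      simpa using this
    have hdown : bag[kn] ≤ m := by
      have hmm : m ∈ bag := hpm.symm.subset (by simp)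
      obtain ⟨j, hj, hjv⟩ := List.mem_iff_getElem.mp hmm
      have := h2 j hj
      rw [getD_eq_getElem _ _ hknl, getD_eq_getElem _ _ hj, hjv] at this
      exact this
    exact le_antisymm hdown hup
  refine ⟨bag.eraseIdx kn, ?_, ?_⟩
  · rw [hcast, PySem.List.pop?_natCast bag kn hknl, hval]
  · have he := coe_eraseIdx bag kn hknl
    rw [hval, hperm] at he
    have he2 : m ::ₘ ((bag.eraseIdx kn : List Int) : Multiset Int)
        = m ::ₘ ((t : List Int) : Multiset Int) := by
      rw [← Multiset.singleton_add, ← Multiset.singleton_add]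
      rw [add_comm ({m} : Multiset Int) _ , he]
      rfl
    exact (Multiset.cons_inj_right m).mp he2

-- min() of the bag equals the head of any sorted list with the same multiset
theorem minD_eq_sorted_head (bag g : List Int) (hp : g.Pairwise (· ≤ ·))
    (hne : g ≠ []) (hperm : (bag : Multiset Int) = (g : Multiset Int)) :
    (PySem.List.min? bag (fun x => x)).getD 0 = g.getD 0 0 := by
  have hpm : bag.Perm g := Multiset.coe_eq_coe.mp hperm
  have hbne : bag ≠ [] := by
    intro e; subst e
    exact hne hpm.symm.eq_nil
  cases hm : PySem.List.min? bag (fun x => x) with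
  | none => exact absurd ((PySem.List.min?_eq_none_iff bag _).mp hm) hbne
  | some v =>
    have hlg : 0 < g.length := List.length_pos_iff.mpr hne
    have hmem : v ∈ bag := PySem.List.min?_mem hm
    have hup : g.getD 0 0 ≤ v := pairwise_head_le g hp v (hpm.subset hmem)
    have hgm : g.getD 0 0 ∈ g := by
      rw [getD_eq_getElem _ _ hlg]; exact List.getElem_mem hlg
    have hdown : v ≤ g.getD 0 0 := PySem.List.min?_isMin hm _ (hpm.symm.subset hgm)
    simpa using le_antisymm hdown hup

-- one-step unfoldings of B's loop
theorem bagLoop_zero (bag : List Int) (K ans : Int) :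
    bagLoop 0 bag K ans = -1 := rfl

theorem bagLoop_base (fuel : Nat) (bag : List Int) (K ans : Int) (h : ¬ 1 < bag.length) :
    bagLoop (fuel + 1) bag K ans = -1 := by
  rw [bagLoop]; rw [if_neg h]

theorem bagLoop_step (fuel : Nat) (bag bag1 bag2 : List Int) (K ans first second : Int)
    (h : 1 < bag.length)
    (h1 : PySem.List.pop? bag (argmin bag) = some (first, bag1))
    (h2 : PySem.List.pop? bag1 (argmin bag1) = some (second, bag2)) :
    bagLoop (fuel + 1) bag K ans =
      if (PySem.List.min? (bag2 ++ [first + 2 * second]) (fun x => x)).getD 0 ≥ K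
      then ans + 1
      else bagLoop fuel (bag2 ++ [first + 2 * second]) K (ans + 1) := by
  rw [bagLoop]
  simp only [if_pos h, h1, h2]

-- the B-side simulation: B's bag loop and the ghost sorted-list loop agree whenever the
-- bag and the sorted list carry the same multiset
theorem loopB_eq : ∀ (n : Nat) (bag lB : List Int) (K ans : Int),
    bag.length = n → lB.Pairwise (· ≤ ·) →
    (bag : Multiset Int) = (lB : Multiset Int) →
    bagLoop n bag K ans = ghostLoop n lB K ans := by
  intro n
  induction n using Nat.strong_induction_on with
  | _ n ih =>
  intro bag lB K ans hlen hp hperm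
  have hlB : lB.length = n := by
    have := congrArg Multiset.card hperm
    rw [Multiset.coe_card, Multiset.coe_card, hlen] at this
    omega
  by_cases hn : n ≤ 1
  · rcases n with _ | m
    · rw [bagLoop_zero, ghostLoop_zero]
    · rw [bagLoop_base _ _ _ _ (by omega), ghostLoop_base _ _ _ _ (by omega)]
  · obtain ⟨m, rfl⟩ : ∃ m, n = m + 1 := ⟨n - 1, by omega⟩
    rcases lB with _ | ⟨b0, lB'⟩
    · simp at hlB
    rcases lB' with _ | ⟨b1, bt⟩
    · simp at hlB
      omega
    have hp2 : (b1 :: bt).Pairwise (· ≤ ·) := (List.pairwise_cons.mp hp).2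
    obtain ⟨bag1, hpop1, hm1⟩ := pop_argmin_spec bag b0 (b1 :: bt) hp hperm
    obtain ⟨bag2, hpop2, hm2⟩ := pop_argmin_spec bag1 b1 bt hp2 hm1
    have hbag1len : bag1.length + 1 = bag.length :=
      PySem.List.length_of_pop?_eq_some _ hpop1
    have hbag2len : bag2.length + 1 = bag1.length :=
      PySem.List.length_of_pop?_eq_some _ hpop2
    have hslice : PySem.List.slice (b0 :: b1 :: bt) (some 2) none = bt := by
      have := PySem.List.slice_from_natCast (b0 :: b1 :: bt) 2
      simpa using this
    have hpbt : bt.Pairwise (· ≤ ·) := (List.pairwise_cons.mp hp2).2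
    obtain ⟨t1, t2⟩ := insert_bis_spec bt (b0 + 2 * b1) hpbt
    have hinsne : PySem.List.insert bt ((bisLoop bt (b0 + 2 * b1) 0 bt.length : Nat) : Int) (b0 + 2 * b1) ≠ [] := by
      intro e
      have := PySem.List.length_insert bt ((bisLoop bt (b0 + 2 * b1) 0 bt.length : Nat) : Int) (b0 + 2 * b1)
      rw [e] at this
      simp at this
    have hm3 : ((bag2 ++ [b0 + 2 * b1] : List Int) : Multiset Int)
        = ((PySem.List.insert bt ((bisLoop bt (b0 + 2 * b1) 0 bt.length : Nat) : Int) (b0 + 2 * b1) : List Int) : Multiset Int) := by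
      rw [t2]
      rw [show ((bag2 ++ [b0 + 2 * b1] : List Int) : Multiset Int)
        = (bag2 : Multiset Int) + ([b0 + 2 * b1] : List Int) from rfl]
      rw [hm2]
      rw [← Multiset.singleton_add]
      rw [add_comm]
      rfl
    have hhead : (PySem.List.min? (bag2 ++ [b0 + 2 * b1]) (fun x => x)).getD 0
        = (PySem.List.insert bt ((bisLoop bt (b0 + 2 * b1) 0 bt.length : Nat) : Int) (b0 + 2 * b1)).getD 0 0 :=
      minD_eq_sorted_head _ _ t1 hinsne hm3
    rw [bagLoop_step m bag bag1 bag2 K ans b0 b1 (by omega) hpop1 hpop2,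
      ghostLoop_step _ _ _ _ (by simp)]
    rw [hslice]
    rw [show ((b0 :: b1 :: bt : List Int).getD 0 0) = b0 from rfl,
      show ((b0 :: b1 :: bt : List Int).getD 1 0) = b1 from rfl, hhead]
    split_ifs with hK
    · rfl
    · apply ih m (by omega)
      · simp
        omega
      · exact t1
      · exact hm3

-- ===== VERDICT (by name: the statement is the Claim_ definition above) =====
theorem solution_spec : Claim_equal_solution := by
  intro scoville K _hdom hpre
  unfold Spec_solution
  have hp : (PySem.List.sorted scoville (fun x => x) false).Pairwise (· ≤ ·) :=
    PySem.List.sorted_pairwise scoville (fun x => x)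
  have hsne : PySem.List.sorted scoville (fun x => x) false ≠ [] := by
    intro e
    exact hpre ((PySem.List.sorted_eq_nil_iff scoville (fun x => x) false).mp e)
  have hsperm : (scoville : Multiset Int)
      = ((PySem.List.sorted scoville (fun x => x) false : List Int) : Multiset Int) :=
    (Multiset.coe_eq_coe.mpr (PySem.List.sorted_perm scoville (fun x => x) false)).symm
  obtain ⟨hH, hM⟩ := pyHeapify_spec _ (pairwise_isHeap _ hp)
  have hhd : (pyHeapify (PySem.List.sorted scoville (fun x => x) false)).getD 0 0
      = (PySem.List.sorted scoville (fun x => x) false).getD 0 0 :=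
    heap_head_eq _ _ hH hp hsne hM
  have hmin : (PySem.List.min? scoville (fun x => x)).getD 0
      = (PySem.List.sorted scoville (fun x => x) false).getD 0 0 :=
    minD_eq_sorted_head _ _ hp hsne hsperm
  show solution scoville K = solution_alt scoville K
  simp only [solution, solution_alt]
  rw [hhd, hmin]
  split_ifs with hK
  · rfl
  · have hle : (pyHeapify (PySem.List.sorted scoville (fun x => x) false)).length
        = (PySem.List.sorted scoville (fun x => x) false).length := by
      have := congrArg Multiset.card hM
      rw [Multiset.coe_card, Multiset.coe_card] at this
      exact this
    have hslen : scoville.length = (PySem.List.sorted scoville (fun x => x) false).length :=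
      (PySem.List.length_sorted scoville (fun x => x) false).symm
    rw [loop_eq (pyHeapify (PySem.List.sorted scoville (fun x => x) false)).length _ _ K 0
      rfl hH hp hM]
    rw [loopB_eq scoville.length scoville _ K 0 rfl hp hsperm]
    rw [hle, ← hslen]
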